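-- pv_equiv track=rewrite | github.com/codecontemplator/aoc2024 | day7/d7p2.py | calc
-- ===== SOURCE A (Python) =====
-- def calc(l):
--     if len(l) == 1:
--         return [l[0]]
--     else:
--         a = l[0]
--         b = l[1]
--         l2 = l[2:]
--         x = [a * b] + l2
--         y = [a + b] + l2
--         z = [int(str(a)+str(b))] + l2
--         r1 = calc(x)
--         r2 = calc(y)
--         r3 = calc(z)
--         return r1 + r2 + r3
-- ===== SOURCE B (Python) =====
-- def calc(l):
--     partials = [l[0]]
--     for b in l[1:]:
--         partials = [r for p in partials for r in (p * b, p + b, int(str(p) + str(b)))]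
--     return partials
-- ===== Notes on version B (the rewrite author's own statement) =====
-- stated objective: simpler
-- what changed: Replaces the branching recursion (which rebuilds and re-traverses the remaining list three times per step) with a single left-to-right fold that keeps the list of partial results and expands it in order with *, + and digit-concatenation.
import Mathlib
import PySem

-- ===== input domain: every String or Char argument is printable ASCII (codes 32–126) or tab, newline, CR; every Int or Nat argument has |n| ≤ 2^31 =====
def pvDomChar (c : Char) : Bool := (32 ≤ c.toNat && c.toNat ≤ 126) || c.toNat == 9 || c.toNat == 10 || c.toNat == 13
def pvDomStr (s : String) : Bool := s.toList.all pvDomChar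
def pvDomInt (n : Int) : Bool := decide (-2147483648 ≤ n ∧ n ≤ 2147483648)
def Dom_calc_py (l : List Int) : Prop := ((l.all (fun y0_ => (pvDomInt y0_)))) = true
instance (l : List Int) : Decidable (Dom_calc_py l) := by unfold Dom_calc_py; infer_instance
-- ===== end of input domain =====

-- B replaces A's branching recursion by one left-to-right fold over a list of partial
-- results (objective: simpler). Equivalence is about return values; neither mutates l.

-- ===== PORT A =====
-- int(str(p)+str(b)): within Pre_ (tail elements nonnegative) the parse always succeeds,
-- so the .getD 0 default is never used; Python raises ValueError outside Pre_.
def pvConcat (p b : Int) : Int :=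
  (PySem.Int.ofStr? (PySem.Int.toStr p ++ PySem.Int.toStr b)).getD 0

def calc_py (l : List Int) : List Int :=
  if l.length = 1 then
    [(PySem.List.pyGet? l 0).getD 0]
  else
    match l with
    | a :: b :: l2 =>
        calc_py ((a * b) :: l2) ++ calc_py ((a + b) :: l2) ++ calc_py (pvConcat a b :: l2)
    | _ => []   -- Python raises IndexError here (l = []); excluded by Pre_
termination_by l.length

-- ===== PORT B =====
def calc_py_alt (l : List Int) : List Int :=
  match l with
  | [] => []   -- B raises IndexError on l[0] here; excluded by Pre_
  | a :: rest =>
      rest.foldl (fun partials b =>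
        partials.flatMap (fun p => [p * b, p + b, pvConcat p b])) [a]

-- ===== PRECONDITION & SPEC =====
-- Pre_ excludes exactly the inputs on which Python A raises: the empty list (IndexError on
-- l[0]) and lists with a negative element after the head, where int(str(p)+str(b)) raises
-- ValueError; B raises identically there.
def Pre_calc_py (l : List Int) : Prop := l ≠ [] ∧ ∀ x ∈ l.tail, 0 ≤ x
instance (l : List Int) : Decidable (Pre_calc_py l) := by unfold Pre_calc_py; infer_instance
def pvWitness_calc_py : List Int := [-3, 4, 5]

def Spec_calc_py (l : List Int) (out : List Int) : Prop := out = calc_py_alt l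
instance (l : List Int) (out : List Int) : Decidable (Spec_calc_py l out) := by unfold Spec_calc_py; infer_instance

-- ===== CLAIM (what is proved, stated in full; the proofs are below) =====
def Claim_equal_calc_py : Prop := ∀ (l : List Int), Dom_calc_py l → Pre_calc_py l → Spec_calc_py l (calc_py l)

-- ===== LEMMAS AND PROOFS =====

def pvStep (partials : List Int) (b : Int) : List Int :=
  partials.flatMap (fun p => [p * b, p + b, pvConcat p b])

theorem pvStep_append (xs ys : List Int) (b : Int) :
    pvStep (xs ++ ys) b = pvStep xs b ++ pvStep ys b := by
  simp [pvStep]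

theorem foldl_pvStep_append (t : List Int) (xs ys : List Int) :
    t.foldl pvStep (xs ++ ys) = t.foldl pvStep xs ++ t.foldl pvStep ys := by
  induction t generalizing xs ys with
  | nil => simp
  | cons b t ih => simp only [List.foldl]; rw [pvStep_append, ih]

theorem calc_py_fold (t : List Int) : ∀ a : Int, calc_py (a :: t) = t.foldl pvStep [a] := by
  induction t with
  | nil => intro a; simp [calc_py, PySem.List.pyGet?, PySem.List.pyIdx?]
  | cons b t ih =>
      intro a
      rw [calc_py]
      simp only [List.length_cons, List.foldl]
      have hlen : ¬ (t.length + 1 + 1 = 1) := by omega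
      rw [if_neg hlen]
      have hstep : pvStep [a] b = [a * b] ++ [a + b] ++ [pvConcat a b] := by
        simp [pvStep]
      rw [ih, ih, ih, hstep, foldl_pvStep_append, foldl_pvStep_append]

theorem calc_py_spec : Claim_equal_calc_py := by
  intro l _ hpre
  unfold Spec_calc_py
  obtain ⟨hne, -⟩ := hpre
  match l with
  | [] => exact absurd rfl hne
  | a :: t =>
      show calc_py (a :: t) = calc_py_alt (a :: t)
      rw [calc_py_fold]
      rfl
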